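-- pv_equiv track=rewrite | github.com/FernandoKGA/DesafiosDeProgramacao1 | Lista5/C - Lala Land and Apple Trees/lalaLandAndAppleTrees.py | getApples
-- ===== SOURCE A (Python) =====
-- lado_esquerdo = 'L'
--
-- lado_direito = 'R'
--
-- def getApples(lado_negativo, lado_positivo, lado):
--     total = 0
--     while True:
--         if lado == lado_esquerdo:
--             if len(lado_negativo) > 0:
--                 temp = lado_negativo.pop()
--                 total += temp[1]
--                 lado = lado_direito
--             else:
--                 break
--         else:
--             if len(lado_positivo) > 0:
--                 temp = lado_positivo.pop()
--                 total += temp[1]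
--                 lado = lado_esquerdo
--             else:
--                 break
--     return total
-- ===== SOURCE B (Python) =====
-- def getApples(lado_negativo, lado_positivo, lado):
--     start, other = (lado_negativo, lado_positivo) if lado == 'L' else (lado_positivo, lado_negativo)
--     ks = min(len(start), len(other) + 1)
--     ko = min(len(start), len(other))
--     total = sum(x[1] for x in start[len(start) - ks:]) + sum(x[1] for x in other[len(other) - ko:])
--     del start[len(start) - ks:]
--     del other[len(other) - ko:]
--     return total
-- ===== Notes on version B (the rewrite author's own statement) =====
-- stated objective: alternative
-- what changed: Replaces the alternating pop-one-at-a-time while loop with a closed-form count (min of the two lengths) of how many items each side contributes, two trailing-slice sums, and two bulk slice deletions.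
import Mathlib
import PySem

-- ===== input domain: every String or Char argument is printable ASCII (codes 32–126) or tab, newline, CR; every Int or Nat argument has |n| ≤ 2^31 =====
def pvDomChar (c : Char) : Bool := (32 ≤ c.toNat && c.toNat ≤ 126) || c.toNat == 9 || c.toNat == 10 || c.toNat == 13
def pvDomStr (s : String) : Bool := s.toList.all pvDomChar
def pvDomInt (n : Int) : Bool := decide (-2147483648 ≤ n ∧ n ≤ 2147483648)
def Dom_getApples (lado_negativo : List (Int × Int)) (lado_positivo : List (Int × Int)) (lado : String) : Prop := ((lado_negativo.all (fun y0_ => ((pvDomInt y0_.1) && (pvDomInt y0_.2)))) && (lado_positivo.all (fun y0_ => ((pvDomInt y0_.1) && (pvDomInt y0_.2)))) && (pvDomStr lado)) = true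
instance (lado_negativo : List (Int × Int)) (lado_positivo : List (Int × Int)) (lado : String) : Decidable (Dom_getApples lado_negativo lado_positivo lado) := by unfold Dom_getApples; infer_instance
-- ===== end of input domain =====

-- B replaces the alternating pop loop with a closed-form count of the items each side
-- contributes and two trailing-slice sums (A mutates its list arguments by popping; B
-- performs the same mutation via bulk slice deletion; the theorem is about the return value).

-- ===== PORT A =====
-- the while-loop of A: state (lado_negativo, lado_positivo, lado, total)
def getApplesLoop (neg pos : List (Int × Int)) (lado : String) (total : Int) : Int :=
  if lado == "L" then
    if h : neg.length > 0 then
      getApplesLoop neg.dropLast pos "R" (total + (neg.getLast (by intro he; simp [he] at h)).2)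
    else total
  else
    if h : pos.length > 0 then
      getApplesLoop neg pos.dropLast "L" (total + (pos.getLast (by intro he; simp [he] at h)).2)
    else total
termination_by neg.length + pos.length
decreasing_by
  · simp [List.length_dropLast]; omega
  · simp [List.length_dropLast]; omega

def getApples (lado_negativo : List (Int × Int)) (lado_positivo : List (Int × Int)) (lado : String) : Int :=
  getApplesLoop lado_negativo lado_positivo lado 0

-- ===== PORT B =====
-- sum of the second components of the last k elements (the slice start[len-k:] of Source B)
def pvTailSum (l : List (Int × Int)) (k : Nat) : Int :=
  ((l.drop (l.length - k)).map (·.2)).sum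

def getApples_alt (lado_negativo : List (Int × Int)) (lado_positivo : List (Int × Int)) (lado : String) : Int :=
  let start := if lado == "L" then lado_negativo else lado_positivo
  let other := if lado == "L" then lado_positivo else lado_negativo
  let ks := min start.length (other.length + 1)
  let ko := min start.length other.length
  pvTailSum start ks + pvTailSum other ko

-- ===== PRECONDITION & SPEC =====
def Spec_getApples (lado_negativo : List (Int × Int)) (lado_positivo : List (Int × Int)) (lado : String) (out : Int) : Prop := out = getApples_alt lado_negativo lado_positivo lado
instance (lado_negativo : List (Int × Int)) (lado_positivo : List (Int × Int)) (lado : String) (out : Int) : Decidable (Spec_getApples lado_negativo lado_positivo lado out) := by unfold Spec_getApples; infer_instance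

-- ===== CLAIM (what is proved, stated in full; the proofs are below) =====
def Claim_equal_getApples : Prop := ∀ (lado_negativo : List (Int × Int)) (lado_positivo : List (Int × Int)) (lado : String), Dom_getApples lado_negativo lado_positivo lado → Spec_getApples lado_negativo lado_positivo lado (getApples lado_negativo lado_positivo lado)

-- ===== LEMMAS AND PROOFS =====

lemma pvTailSum_zero (l : List (Int × Int)) : pvTailSum l 0 = 0 := by
  simp [pvTailSum]

-- peeling the last element off a (k+1)-element tail slice
lemma pvTailSum_succ (l : List (Int × Int)) (h : l ≠ []) (k : Nat)
    (hk : k ≤ l.length - 1) :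
    pvTailSum l (k + 1) = (l.getLast h).2 + pvTailSum l.dropLast k := by
  have hlen : 1 ≤ l.length := List.length_pos_iff.mpr h
  have hdl : l.dropLast.length = l.length - 1 := List.length_dropLast
  have key : l.drop (l.length - (k + 1)) =
      l.dropLast.drop (l.dropLast.length - k) ++ [l.getLast h] := by
    conv_lhs => rw [← List.dropLast_concat_getLast h]
    have hlen2 : (l.dropLast ++ [l.getLast h]).length - (k + 1) = l.dropLast.length - k := by
      simp
    rw [hlen2, List.drop_append_of_le_length (by omega)]
  rw [pvTailSum, key]
  simp [pvTailSum]
  ring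

-- closed form for the loop, strong induction on the total length
lemma getApplesLoop_closed : ∀ (n : Nat) (a b : List (Int × Int)) (lado : String) (total : Int),
    a.length + b.length ≤ n →
    getApplesLoop a b lado total =
      total + (if lado == "L"
        then pvTailSum a (min a.length (b.length + 1)) + pvTailSum b (min a.length b.length)
        else pvTailSum b (min b.length (a.length + 1)) + pvTailSum a (min b.length a.length)) := by
  intro n
  induction n with
  | zero =>
    intro a b lado total hle
    have ha : a = [] := by cases a <;> simp_all
    have hb : b = [] := by cases b <;> simp_all
    subst ha; subst hb
    rw [getApplesLoop]
    simp [pvTailSum_zero]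
  | succ m ih =>
    intro a b lado total hle
    rw [getApplesLoop]
    by_cases hl : (lado == "L") = true
    · by_cases ha : a.length > 0
      · have hane : a ≠ [] := by intro he; simp [he] at ha
        have hdl : a.dropLast.length = a.length - 1 := List.length_dropLast
        rw [if_pos hl, dif_pos ha, ih _ _ _ _ (by omega)]
        rw [if_neg (by decide : ¬((("R" : String) == "L") = true))]
        rw [show min a.length (b.length + 1) = min b.length a.dropLast.length + 1 from by omega,
            show min a.length b.length = min b.length (a.dropLast.length + 1) from by omega,
            pvTailSum_succ a hane _ (by omega)]
        rw [if_pos hl]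
        ring
      · rw [if_pos hl, dif_neg ha]
        have ha0 : a = [] := by cases a <;> simp_all
        have hl' : lado = "L" := by simpa using hl
        subst ha0
        simp [pvTailSum, hl']
    · by_cases hb : b.length > 0
      · have hbne : b ≠ [] := by intro he; simp [he] at hb
        have hdl : b.dropLast.length = b.length - 1 := List.length_dropLast
        rw [if_neg hl, dif_pos hb, ih _ _ _ _ (by omega)]
        rw [if_pos (by decide : ((("L" : String) == "L") = true))]
        rw [show min b.length (a.length + 1) = min a.length b.dropLast.length + 1 from by omega,
            show min b.length a.length = min a.length (b.dropLast.length + 1) from by omega,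
            pvTailSum_succ b hbne _ (by omega)]
        rw [if_neg hl]
        ring
      · rw [if_neg hl, dif_neg hb]
        have hb0 : b = [] := by cases b <;> simp_all
        have hl' : ¬ lado = "L" := by simpa using hl
        subst hb0
        simp [pvTailSum, hl']

-- ===== VERDICT (by name: the statement is the Claim_ definition above) =====
theorem getApples_spec : Claim_equal_getApples := by
  intro neg pos lado _
  unfold Spec_getApples getApples getApples_alt
  rw [getApplesLoop_closed (neg.length + pos.length) neg pos lado 0 le_rfl]
  by_cases hl : lado == "L" <;> simp [hl]
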